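-- pv_equiv track=rewrite | github.com/mangostin2010/Snake | snake.py | ai_choose_direction
-- ===== SOURCE A (Python) =====
-- frame = (1024, 576)
--
-- def ai_choose_direction(ai_snake_pos, ai_snake_body, food_pos, player_snake_body, item_pos=None):
--     """
--     음식과의 x축이 다르면 x축 먼저 맞춤, 그 다음 y축 맞춤.
--     충돌이 예상되는 방향은 건너뜀.
--     """
--     x, y = ai_snake_pos
--     fx, fy = food_pos
--
--     candidates = []
--
--     # 1. x축 먼저 맞추기
--     if x < fx:
--         candidates.append('RIGHT')
--     elif x > fx:
--         candidates.append('LEFT')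
--     # 2. y축 맞추기
--     if y < fy:
--         candidates.append('DOWN')
--     elif y > fy:
--         candidates.append('UP')
--
--     # 장애물 체크
--     for d in candidates:
--         nx, ny = x, y
--         if d == 'UP':
--             ny -= 10
--         elif d == 'DOWN':
--             ny += 10
--         elif d == 'LEFT':
--             nx -= 10
--         elif d == 'RIGHT':
--             nx += 10
--         next_pos = [nx, ny]
--         if nx < 0 or nx > frame[0] - 10 or ny < 0 or ny > frame[1] - 10:
--             continue
--         if next_pos in ai_snake_body or next_pos in player_snake_body:
--             continue
--         return d
--
--     # 만약 위에서 선택 못하면, 살아남을 수 있는 아무 방향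
--     for d in ['UP', 'DOWN', 'LEFT', 'RIGHT']:
--         nx, ny = x, y
--         if d == 'UP':
--             ny -= 10
--         elif d == 'DOWN':
--             ny += 10
--         elif d == 'LEFT':
--             nx -= 10
--         elif d == 'RIGHT':
--             nx += 10
--         next_pos = [nx, ny]
--         if nx < 0 or nx > frame[0] - 10 or ny < 0 or ny > frame[1] - 10:
--             continue
--         if next_pos in ai_snake_body or next_pos in player_snake_body:
--             continue
--         return d
--     return 'UP'  # 어디든 부딪혀야한다면 아무 방향
-- ===== SOURCE B (Python) =====
-- frame = (1024, 576)
-- DIRS = ('UP', 'DOWN', 'LEFT', 'RIGHT')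
--
-- def ai_choose_direction(ai_snake_pos, ai_snake_body, food_pos, player_snake_body, item_pos=None):
--     x, y = ai_snake_pos
--     fx, fy = food_pos
--     prefs = []
--     if x < fx:
--         prefs.append('RIGHT')
--     elif x > fx:
--         prefs.append('LEFT')
--     if y < fy:
--         prefs.append('DOWN')
--     elif y > fy:
--         prefs.append('UP')
--     # rank = first occurrence index of each direction in the preference order
--     rank = {}
--     for i, d in enumerate(prefs + list(DIRS)):
--         if d not in rank:
--             rank[d] = i
--     # set of all safe moves, computed once with arithmetic deltas
--     safe = []
--     for d in DIRS:
--         nx = x + 10 * ((d == 'RIGHT') - (d == 'LEFT'))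
--         ny = y + 10 * ((d == 'DOWN') - (d == 'UP'))
--         if 0 <= nx <= frame[0] - 10 and 0 <= ny <= frame[1] - 10 \
--                 and [nx, ny] not in ai_snake_body and [nx, ny] not in player_snake_body:
--             safe.append(d)
--     return min(safe, key=rank.__getitem__) if safe else 'UP'
-- ===== Notes on version B (the rewrite author's own statement) =====
-- stated objective: alternative
-- what changed: B replaces A's two sequential first-match scans over candidate directions by a rank map (first occurrence index in the preference order), a single pass computing the set of all safe directions with arithmetic deltas, and a min-by-rank selection (min(safe, key=rank.__getitem__)) with 'UP' for the empty set.
import Mathlib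
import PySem

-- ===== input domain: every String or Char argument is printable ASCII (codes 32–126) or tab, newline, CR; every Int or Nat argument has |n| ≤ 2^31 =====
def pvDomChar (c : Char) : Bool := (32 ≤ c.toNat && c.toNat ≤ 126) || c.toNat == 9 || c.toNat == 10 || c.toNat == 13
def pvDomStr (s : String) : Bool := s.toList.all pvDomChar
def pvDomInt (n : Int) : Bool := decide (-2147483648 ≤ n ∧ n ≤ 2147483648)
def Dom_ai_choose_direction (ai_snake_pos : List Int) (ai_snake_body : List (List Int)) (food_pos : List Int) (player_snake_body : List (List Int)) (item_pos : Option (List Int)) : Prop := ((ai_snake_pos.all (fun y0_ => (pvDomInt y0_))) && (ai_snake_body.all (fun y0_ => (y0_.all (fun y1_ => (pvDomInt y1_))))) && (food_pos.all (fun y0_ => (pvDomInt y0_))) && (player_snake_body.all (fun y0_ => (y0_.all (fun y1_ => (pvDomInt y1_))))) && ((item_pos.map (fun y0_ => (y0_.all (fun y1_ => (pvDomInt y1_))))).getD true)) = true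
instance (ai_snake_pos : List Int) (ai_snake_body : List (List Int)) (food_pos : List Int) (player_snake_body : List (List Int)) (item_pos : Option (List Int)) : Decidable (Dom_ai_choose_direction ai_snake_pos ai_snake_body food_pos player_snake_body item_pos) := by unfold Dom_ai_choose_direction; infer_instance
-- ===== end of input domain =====

-- B replaces A's two sequential first-match scans by a rank map (first occurrence index in the
-- preference order), one pass computing the set of all safe directions, and a min-by-rank selection
-- (objective: alternative; same cost).


-- ===== PORT A =====
-- A's per-candidate loop: compute nx,ny by the if-chain, skip out-of-bounds and collisions, return first ok
def pvALoop (x y : Int) (ai_snake_body player_snake_body : List (List Int)) : List String → Option String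
  | [] => none
  | d :: rest =>
    let nx : Int := if d = "UP" then x else if d = "DOWN" then x else if d = "LEFT" then x - 10 else if d = "RIGHT" then x + 10 else x
    let ny : Int := if d = "UP" then y - 10 else if d = "DOWN" then y + 10 else if d = "LEFT" then y else if d = "RIGHT" then y else y
    let next_pos : List Int := [nx, ny]
    if nx < 0 ∨ nx > 1024 - 10 ∨ ny < 0 ∨ ny > 576 - 10 then
      pvALoop x y ai_snake_body player_snake_body rest
    else if next_pos ∈ ai_snake_body ∨ next_pos ∈ player_snake_body then
      pvALoop x y ai_snake_body player_snake_body rest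
    else
      some d

def ai_choose_direction (ai_snake_pos : List Int) (ai_snake_body : List (List Int)) (food_pos : List Int) (player_snake_body : List (List Int)) (item_pos : Option (List Int)) : String :=
  match ai_snake_pos, food_pos with
  | [x, y], [fx, fy] =>
    let candidates : List String :=
      ((if x < fx then ["RIGHT"] else if x > fx then ["LEFT"] else []) ++
       (if y < fy then ["DOWN"] else if y > fy then ["UP"] else []))
    match pvALoop x y ai_snake_body player_snake_body candidates with
    | some d => d
    | none =>
      match pvALoop x y ai_snake_body player_snake_body ["UP", "DOWN", "LEFT", "RIGHT"] with
      | some d => d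
      | none => "UP"
  | _, _ => "UP"  -- unreachable under Pre_ (Python raises on unpacking)

-- ===== PORT B =====
-- B's one-shot safety test with arithmetic deltas: nx = x + 10*((d=='RIGHT')-(d=='LEFT')), …
def pvSafeB (x y : Int) (ai_snake_body player_snake_body : List (List Int)) (d : String) : Bool :=
  let nx : Int := x + 10 * ((if d = "RIGHT" then 1 else 0) - (if d = "LEFT" then 1 else 0))
  let ny : Int := y + 10 * ((if d = "DOWN" then 1 else 0) - (if d = "UP" then 1 else 0))
  decide (0 ≤ nx) && decide (nx ≤ 1024 - 10) && decide (0 ≤ ny) && decide (ny ≤ 576 - 10) &&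
    !(decide ([nx, ny] ∈ ai_snake_body)) && !(decide ([nx, ny] ∈ player_snake_body))

-- the two coordinate unpackings are read with getD; exact under Pre_ (both lists have length 2)
def ai_choose_direction_alt (ai_snake_pos : List Int) (ai_snake_body : List (List Int)) (food_pos : List Int) (player_snake_body : List (List Int)) (item_pos : Option (List Int)) : String :=
  let x := ai_snake_pos.getD 0 0
  let y := ai_snake_pos.getD 1 0
  let fx := food_pos.getD 0 0
  let fy := food_pos.getD 1 0
  let prefs : List String :=
    ((if x < fx then ["RIGHT"] else if x > fx then ["LEFT"] else []) ++
     (if y < fy then ["DOWN"] else if y > fy then ["UP"] else []))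
  let rank : PySem.Dict String Int :=
    (PySem.List.enumerate (prefs ++ ["UP", "DOWN", "LEFT", "RIGHT"]) 0).foldl
      (fun r p => if r.contains p.2 then r else r.insert p.2 p.1) PySem.Dict.empty
  let safe : List String :=
    (["UP", "DOWN", "LEFT", "RIGHT"] : List String).filter (pvSafeB x y ai_snake_body player_snake_body)
  if safe.isEmpty then "UP"
  else (PySem.List.min? safe (fun d => (rank.get? d).getD 0)).getD "UP"

-- ===== PRECONDITION & SPEC =====
-- Pre_ excludes exactly the inputs where Python A raises (unpacking 'x, y = ai_snake_pos' / 'fx, fy = food_pos' needs length 2)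
def Pre_ai_choose_direction (ai_snake_pos : List Int) (ai_snake_body : List (List Int)) (food_pos : List Int) (player_snake_body : List (List Int)) (item_pos : Option (List Int)) : Prop :=
  ai_snake_pos.length = 2 ∧ food_pos.length = 2
instance (ai_snake_pos : List Int) (ai_snake_body : List (List Int)) (food_pos : List Int) (player_snake_body : List (List Int)) (item_pos : Option (List Int)) : Decidable (Pre_ai_choose_direction ai_snake_pos ai_snake_body food_pos player_snake_body item_pos) := by unfold Pre_ai_choose_direction; infer_instance

def pvWitness_ai_choose_direction : List Int × List (List Int) × List Int × List (List Int) × Option (List Int) :=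
  ([100, 100], [[110, 100]], [200, 150], [], none)

def Spec_ai_choose_direction (ai_snake_pos : List Int) (ai_snake_body : List (List Int)) (food_pos : List Int) (player_snake_body : List (List Int)) (item_pos : Option (List Int)) (out : String) : Prop := out = ai_choose_direction_alt ai_snake_pos ai_snake_body food_pos player_snake_body item_pos
instance (ai_snake_pos : List Int) (ai_snake_body : List (List Int)) (food_pos : List Int) (player_snake_body : List (List Int)) (item_pos : Option (List Int)) (out : String) : Decidable (Spec_ai_choose_direction ai_snake_pos ai_snake_body food_pos player_snake_body item_pos out) := by unfold Spec_ai_choose_direction; infer_instance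

-- ===== CLAIM =====
def Claim_equal_ai_choose_direction : Prop := ∀ (ai_snake_pos : List Int) (ai_snake_body : List (List Int)) (food_pos : List Int) (player_snake_body : List (List Int)) (item_pos : Option (List Int)), Dom_ai_choose_direction ai_snake_pos ai_snake_body food_pos player_snake_body item_pos → Pre_ai_choose_direction ai_snake_pos ai_snake_body food_pos player_snake_body item_pos → Spec_ai_choose_direction ai_snake_pos ai_snake_body food_pos player_snake_body item_pos (ai_choose_direction ai_snake_pos ai_snake_body food_pos player_snake_body item_pos)

-- ===== LEMMAS AND PROOFS =====

-- A's inline if-chain step decides exactly B's arithmetic safety test on each of the four direction strings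
lemma pvALoop_cons_eq (x y : Int) (ai pb : List (List Int)) (d : String) (rest : List String)
    (hd : d = "UP" ∨ d = "DOWN" ∨ d = "LEFT" ∨ d = "RIGHT") :
    pvALoop x y ai pb (d :: rest) =
      if pvSafeB x y ai pb d then some d else pvALoop x y ai pb rest := by
  rcases hd with hd | hd | hd | hd <;> subst hd <;>
    simp only [pvALoop, pvSafeB] <;> norm_num [sub_eq_add_neg] <;>
    split_ifs <;> simp_all <;> omega

lemma pvALoop_nil (x y : Int) (ai pb : List (List Int)) : pvALoop x y ai pb [] = none := rfl
lemma pvALoop_UP (x y : Int) (ai pb : List (List Int)) (rest : List String) :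
    pvALoop x y ai pb ("UP" :: rest) = if pvSafeB x y ai pb "UP" then some "UP" else pvALoop x y ai pb rest :=
  pvALoop_cons_eq x y ai pb _ rest (Or.inl rfl)
lemma pvALoop_DOWN (x y : Int) (ai pb : List (List Int)) (rest : List String) :
    pvALoop x y ai pb ("DOWN" :: rest) = if pvSafeB x y ai pb "DOWN" then some "DOWN" else pvALoop x y ai pb rest :=
  pvALoop_cons_eq x y ai pb _ rest (Or.inr (Or.inl rfl))
lemma pvALoop_LEFT (x y : Int) (ai pb : List (List Int)) (rest : List String) :
    pvALoop x y ai pb ("LEFT" :: rest) = if pvSafeB x y ai pb "LEFT" then some "LEFT" else pvALoop x y ai pb rest :=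
  pvALoop_cons_eq x y ai pb _ rest (Or.inr (Or.inr (Or.inl rfl)))
lemma pvALoop_RIGHT (x y : Int) (ai pb : List (List Int)) (rest : List String) :
    pvALoop x y ai pb ("RIGHT" :: rest) = if pvSafeB x y ai pb "RIGHT" then some "RIGHT" else pvALoop x y ai pb rest :=
  pvALoop_cons_eq x y ai pb _ rest (Or.inr (Or.inr (Or.inr rfl)))

-- ===== VERDICT =====
set_option maxHeartbeats 2000000 in
theorem ai_choose_direction_spec : Claim_equal_ai_choose_direction := by
  intro ap ab fp pb ip _ hpre
  obtain ⟨h1, h2⟩ := hpre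
  match ap, h1, fp, h2 with
  | [x, y], _, [fx, fy], _ =>
    unfold Spec_ai_choose_direction ai_choose_direction ai_choose_direction_alt
    simp only [List.getD_cons_zero, List.getD_cons_succ]
    by_cases hU : pvSafeB x y ab pb "UP" = true <;>
    by_cases hD : pvSafeB x y ab pb "DOWN" = true <;>
    by_cases hL : pvSafeB x y ab pb "LEFT" = true <;>
    by_cases hR : pvSafeB x y ab pb "RIGHT" = true <;>
    simp only [Bool.not_eq_true] at hU hD hL hR <;>
    simp only [hU, hD, hL, hR, List.filter_cons, List.filter_nil, if_true, if_false,
      Bool.false_eq_true, List.isEmpty_cons, List.isEmpty_nil] <;>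
    split_ifs <;>
    simp only [List.cons_append, List.nil_append, pvALoop_UP, pvALoop_DOWN, pvALoop_LEFT,
      pvALoop_RIGHT, pvALoop_nil, hU, hD, hL, hR, if_true, if_false, Bool.false_eq_true] <;>
    decide
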